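-- pv_equiv track=rewrite | github.com/landarenko0/Practice | syn.py | syntax
-- ===== SOURCE A (Python) =====
-- def syntax(data):
--     """Синтаксический блок. Устанавливает, соответствует ли символьная цепочка заданным формулам Бэкуса-Наура. """
--
--     state = "start"
--     i = 0
--     accept = True
--
--     while i < len(data):
--         if data[i][1] == "keyword_repeat" and state == "start":
--             state = "repeat"
--         elif data[i][1] == "identifier" and state == "repeat":
--             state = "name1"
--         elif data[i][1] == "bracket1" and state == "name1":
--             state = "bracket1"
--         elif data[i][1] == "dollar_sign" and state == "bracket1":
--             state = "dollar_sign"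
--         elif data[i][1] == "hex" and state == "dollar_sign":
--             state = "hex"
--             hex = data[i][0]
--             # Проверка шестнадцатеричного числа.
--             for j in range(len(data[i][0])):
--                 if hex[j] in "0123456789ABCDFabcdf":
--                     continue
--                 else:
--                     accept = False
--                     break
--         elif (data[i][1] == "plus-minus" or data[i][1] == "multiplication" or data[i][1] == "keyword_div" or data[i][1] == "keyword_mod") and state == "hex":
--             state = "arythm_sign"
--         elif data[i][1] == "identifier" and state == "arythm_sign":
--             state = "name2"
--         elif data[i][1] == "bracket2" and state == "name2":
--             state = "bracket2"
--         elif data[i][1] == "keyword_until" and state == "bracket2":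
--             state = "until"
--         elif data[i][1] == "identifier" and state == "until":
--             state = "name3"
--         elif data[i][1] == "more" and state == "name3":
--             state = "more_sign"
--         elif data[i][1] == "less" and state == "name3":
--             state = "less_sign"
--         elif data[i][1] == "equal" and state == "name3":
--             state = "equal_sign"
--         elif data[i][1] == "plus-minus" and state == "more_sign":
--             state = "sign"
--         elif data[i][1] == "equal" and state == "more_sign":
--             state = "equal_sign"
--         elif data[i][1] == "integer" and state == "more_sign":
--             state = "integer"
--         elif data[i][1] == "plus-minus" and state == "less_sign":
--             state = "sign"
--         elif data[i][1] == "more" and state == "less_sign":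
--             state = "equal_sign"
--         elif data[i][1] == "equal" and state == "less_sign":
--             state = "equal_sign"
--         elif data[i][1] == "integer" and state == "less_sign":
--             state = "integer"
--         elif data[i][1] == "plus-minus" and state == "equal_sign":
--             state = "sign"
--         elif data[i][1] == "integer" and state == "equal_sign":
--             state = "integer"
--         elif data[i][1] == "integer" and state == "sign":
--             state = "integer"
--         elif data[i][1] == "semicolon" and state == "integer":
--             state = "semicolon"
--         elif state == "semicolon":
--             accept = False
--             break
--         else:
--             accept = False
--             break
--
--         i += 1
--
--     if accept and state == "semicolon":
--         return "ACCEPT"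
--     else:
--         return "REJECT"
-- ===== SOURCE B (Python) =====
-- # B: instead of stepping a state machine token by token, match the whole token
-- # sequence at once against the grammar's sentence shape: a fixed 10-token prefix
-- # pattern (with the arithmetic operator and the hex value captured), a tail drawn
-- # from the 12 possible comparison endings, and a hex-digit check on the captured value.
--
-- OPS = {"plus-minus", "multiplication", "keyword_div", "keyword_mod"}
--
-- TAILS = {
--     ("more", "integer", "semicolon"),
--     ("more", "plus-minus", "integer", "semicolon"),
--     ("more", "equal", "integer", "semicolon"),
--     ("more", "equal", "plus-minus", "integer", "semicolon"),
--     ("less", "integer", "semicolon"),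
--     ("less", "plus-minus", "integer", "semicolon"),
--     ("less", "more", "integer", "semicolon"),
--     ("less", "more", "plus-minus", "integer", "semicolon"),
--     ("less", "equal", "integer", "semicolon"),
--     ("less", "equal", "plus-minus", "integer", "semicolon"),
--     ("equal", "integer", "semicolon"),
--     ("equal", "plus-minus", "integer", "semicolon"),
-- }
--
-- HEX = "0123456789ABCDFabcdf"
--
--
-- def _accepts(data):
--     match data:
--         case [(_, "keyword_repeat"), (_, "identifier"), (_, "bracket1"),
--               (_, "dollar_sign"), (hexval, "hex"), (_, op), (_, "identifier"),
--               (_, "bracket2"), (_, "keyword_until"), (_, "identifier"), *rest]: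
--             return (op in OPS
--                     and tuple(t for _, t in rest) in TAILS
--                     and all(c in HEX for c in hexval))
--         case _:
--             return False
--
--
-- def syntax(data):
--     return "ACCEPT" if _accepts(data) else "REJECT"
-- ===== Notes on version B (the rewrite author's own statement) =====
-- stated objective: idiomatic
-- what changed: Replaces A's token-by-token state machine (25-branch if/elif ladder with an accept flag) by a declarative whole-sequence pattern match: the token list is matched at once against the grammar's sentence shape - a fixed 10-token prefix pattern capturing the operator and hex value, a tail drawn from the 12 possible comparison endings, and a hex-digit check on the captured value.
import Mathlib
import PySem

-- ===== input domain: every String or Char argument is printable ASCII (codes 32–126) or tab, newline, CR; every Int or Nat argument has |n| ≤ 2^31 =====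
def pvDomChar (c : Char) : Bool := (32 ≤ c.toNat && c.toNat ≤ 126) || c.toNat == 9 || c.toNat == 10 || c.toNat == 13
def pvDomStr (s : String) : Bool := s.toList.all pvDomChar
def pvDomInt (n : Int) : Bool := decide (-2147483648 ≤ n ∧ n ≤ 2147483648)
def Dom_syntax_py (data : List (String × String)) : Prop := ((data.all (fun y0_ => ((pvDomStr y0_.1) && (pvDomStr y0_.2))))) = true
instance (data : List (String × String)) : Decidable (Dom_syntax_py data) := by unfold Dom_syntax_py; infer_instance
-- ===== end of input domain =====

-- B replaces A's token-by-token state machine by a declarative whole-sequence pattern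
-- match: the data is matched at once against the grammar's fixed 10-token prefix shape,
-- a tail drawn from the 12 possible comparison endings, and a hex-digit check.

-- ===== PORT A =====
-- the inner 'for j in range(len(hex))' check: scans the digits, breaks on the first bad one
def syntaxHexA : List Char → Bool
  | [] => true
  | c :: rest => if ("0123456789ABCDFabcdf".toList.contains c) then syntaxHexA rest else false

-- the while loop: returns (accept, state) at exit (break returns accept = false)
def syntaxLoopA : List (String × String) → String → Bool → Bool × String
  | [], state, accept => (accept, state)
  | (val, tok) :: rest, state, accept =>
    if tok = "keyword_repeat" ∧ state = "start" then syntaxLoopA rest "repeat" accept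
    else if tok = "identifier" ∧ state = "repeat" then syntaxLoopA rest "name1" accept
    else if tok = "bracket1" ∧ state = "name1" then syntaxLoopA rest "bracket1" accept
    else if tok = "dollar_sign" ∧ state = "bracket1" then syntaxLoopA rest "dollar_sign" accept
    else if tok = "hex" ∧ state = "dollar_sign" then
      syntaxLoopA rest "hex" (accept && syntaxHexA val.toList)
    else if (tok = "plus-minus" ∨ tok = "multiplication" ∨ tok = "keyword_div" ∨ tok = "keyword_mod") ∧ state = "hex" then
      syntaxLoopA rest "arythm_sign" accept
    else if tok = "identifier" ∧ state = "arythm_sign" then syntaxLoopA rest "name2" accept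
    else if tok = "bracket2" ∧ state = "name2" then syntaxLoopA rest "bracket2" accept
    else if tok = "keyword_until" ∧ state = "bracket2" then syntaxLoopA rest "until" accept
    else if tok = "identifier" ∧ state = "until" then syntaxLoopA rest "name3" accept
    else if tok = "more" ∧ state = "name3" then syntaxLoopA rest "more_sign" accept
    else if tok = "less" ∧ state = "name3" then syntaxLoopA rest "less_sign" accept
    else if tok = "equal" ∧ state = "name3" then syntaxLoopA rest "equal_sign" accept
    else if tok = "plus-minus" ∧ state = "more_sign" then syntaxLoopA rest "sign" accept
    else if tok = "equal" ∧ state = "more_sign" then syntaxLoopA rest "equal_sign" accept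
    else if tok = "integer" ∧ state = "more_sign" then syntaxLoopA rest "integer" accept
    else if tok = "plus-minus" ∧ state = "less_sign" then syntaxLoopA rest "sign" accept
    else if tok = "more" ∧ state = "less_sign" then syntaxLoopA rest "equal_sign" accept
    else if tok = "equal" ∧ state = "less_sign" then syntaxLoopA rest "equal_sign" accept
    else if tok = "integer" ∧ state = "less_sign" then syntaxLoopA rest "integer" accept
    else if tok = "plus-minus" ∧ state = "equal_sign" then syntaxLoopA rest "sign" accept
    else if tok = "integer" ∧ state = "equal_sign" then syntaxLoopA rest "integer" accept
    else if tok = "integer" ∧ state = "sign" then syntaxLoopA rest "integer" accept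
    else if tok = "semicolon" ∧ state = "integer" then syntaxLoopA rest "semicolon" accept
    else if state = "semicolon" then (false, state)
    else (false, state)

def syntax_py (data : List (String × String)) : String :=
  let r := syntaxLoopA data "start" true
  if r.1 ∧ r.2 = "semicolon" then "ACCEPT" else "REJECT"

-- ===== PORT B =====
def pvOps : PySem.Set String := PySem.Set.ofList
  ["plus-minus", "multiplication", "keyword_div", "keyword_mod"]

def pvTails : PySem.Set (List String) := PySem.Set.ofList
  [ ["more", "integer", "semicolon"]
  , ["more", "plus-minus", "integer", "semicolon"]
  , ["more", "equal", "integer", "semicolon"]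
  , ["more", "equal", "plus-minus", "integer", "semicolon"]
  , ["less", "integer", "semicolon"]
  , ["less", "plus-minus", "integer", "semicolon"]
  , ["less", "more", "integer", "semicolon"]
  , ["less", "more", "plus-minus", "integer", "semicolon"]
  , ["less", "equal", "integer", "semicolon"]
  , ["less", "equal", "plus-minus", "integer", "semicolon"]
  , ["equal", "integer", "semicolon"]
  , ["equal", "plus-minus", "integer", "semicolon"] ]

def pvHexChars : String := "0123456789ABCDFabcdf"

-- the 'match data: case [...10-token pattern..., *rest] if <guard>' of Source B
def pvAccepts (data : List (String × String)) : Bool :=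
  match data with
  | (_, "keyword_repeat") :: (_, "identifier") :: (_, "bracket1") :: (_, "dollar_sign")
      :: (hexval, "hex") :: (_, op) :: (_, "identifier") :: (_, "bracket2")
      :: (_, "keyword_until") :: (_, "identifier") :: rest =>
    PySem.Set.contains pvOps op
      && PySem.Set.contains pvTails (rest.map Prod.snd)
      && hexval.toList.all (fun c => pvHexChars.toList.contains c)
  | _ => false

def syntax_py_alt (data : List (String × String)) : String :=
  if pvAccepts data then "ACCEPT" else "REJECT"

-- ===== PRECONDITION & SPEC =====
def Spec_syntax_py (data : List (String × String)) (out : String) : Prop := out = syntax_py_alt data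
instance (data : List (String × String)) (out : String) : Decidable (Spec_syntax_py data out) := by unfold Spec_syntax_py; infer_instance

-- ===== CLAIM (what is proved, stated in full; the proofs are below) =====
def Claim_equal_syntax_py : Prop := ∀ (data : List (String × String)), Dom_syntax_py data → Spec_syntax_py data (syntax_py data)

-- ===== LEMMAS AND PROOFS =====
-- the acceptance bit of a loop result
def finA (r : Bool × String) : Bool := r.1 && (r.2 == "semicolon")

theorem L_semicolon (rest : List (String × String)) (a : Bool) :
    finA (syntaxLoopA rest "semicolon" a) = (a && rest.isEmpty) := by
  cases rest with
  | nil => simp [finA, syntaxLoopA]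
  | cons p r => obtain ⟨v, t⟩ := p; simp [finA, syntaxLoopA]

theorem L_integer (rest : List (String × String)) (a : Bool) :
    finA (syntaxLoopA rest "integer" a) = (a && (rest.map Prod.snd == ["semicolon"])) := by
  cases rest with
  | nil => simp [finA, syntaxLoopA]
  | cons p r =>
    obtain ⟨v, t⟩ := p
    rw [syntaxLoopA]
    by_cases h : t = "semicolon"
    · subst h; simp [L_semicolon, List.map_eq_nil_iff, List.isEmpty_iff]
    · simp [h, finA]

theorem L_sign (rest : List (String × String)) (a : Bool) :
    finA (syntaxLoopA rest "sign" a) = (a && (rest.map Prod.snd == ["integer", "semicolon"])) := by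
  cases rest with
  | nil => simp [finA, syntaxLoopA]
  | cons p r =>
    obtain ⟨v, t⟩ := p
    rw [syntaxLoopA]
    by_cases h : t = "integer"
    · subst h; simp [L_integer]
    · simp [h, finA]

theorem L_equal_sign (rest : List (String × String)) (a : Bool) :
    finA (syntaxLoopA rest "equal_sign" a) =
      (a && (let ts := rest.map Prod.snd
             (ts == ["integer", "semicolon"]) || (ts == ["plus-minus", "integer", "semicolon"]))) := by
  cases rest with
  | nil => simp [finA, syntaxLoopA]
  | cons p r =>
    obtain ⟨v, t⟩ := p
    rw [syntaxLoopA]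
    by_cases h1 : t = "plus-minus"
    · subst h1; simp [L_sign]
    by_cases h2 : t = "integer"
    · subst h2; simp [L_integer, h1]
    · simp [h1, h2, finA]

theorem L_more_sign (rest : List (String × String)) (a : Bool) :
    finA (syntaxLoopA rest "more_sign" a) =
      (a && (let ts := rest.map Prod.snd
             (ts == ["integer", "semicolon"]) || (ts == ["plus-minus", "integer", "semicolon"])
               || (ts == ["equal", "integer", "semicolon"])
               || (ts == ["equal", "plus-minus", "integer", "semicolon"]))) := by
  cases rest with
  | nil => simp [finA, syntaxLoopA]
  | cons p r =>
    obtain ⟨v, t⟩ := p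
    rw [syntaxLoopA]
    by_cases h1 : t = "plus-minus"
    · subst h1; simp [L_sign]
    by_cases h2 : t = "equal"
    · subst h2; simp [L_equal_sign, h1, Bool.and_or_distrib_left]
    by_cases h3 : t = "integer"
    · subst h3; simp [L_integer, h1, h2]
    · simp [h1, h2, h3, finA]

theorem L_less_sign (rest : List (String × String)) (a : Bool) :
    finA (syntaxLoopA rest "less_sign" a) =
      (a && (let ts := rest.map Prod.snd
             (ts == ["integer", "semicolon"]) || (ts == ["plus-minus", "integer", "semicolon"])
               || (ts == ["more", "integer", "semicolon"])
               || (ts == ["more", "plus-minus", "integer", "semicolon"])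
               || (ts == ["equal", "integer", "semicolon"])
               || (ts == ["equal", "plus-minus", "integer", "semicolon"]))) := by
  cases rest with
  | nil => simp [finA, syntaxLoopA]
  | cons p r =>
    obtain ⟨v, t⟩ := p
    rw [syntaxLoopA]
    by_cases h1 : t = "plus-minus"
    · subst h1; simp [L_sign]
    by_cases h2 : t = "more"
    · subst h2; simp [L_equal_sign, h1, Bool.and_or_distrib_left]
    by_cases h3 : t = "equal"
    · subst h3; simp [L_equal_sign, h1, h2, Bool.and_or_distrib_left]
    by_cases h4 : t = "integer"
    · subst h4; simp [L_integer, h1, h2, h3]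
    · simp [h1, h2, h3, h4, finA]

theorem L_name3 (rest : List (String × String)) (a : Bool) :
    finA (syntaxLoopA rest "name3" a) = (a && PySem.Set.contains pvTails (rest.map Prod.snd)) := by
  cases rest with
  | nil => simp [finA, syntaxLoopA, pvTails, PySem.Set.ofList, PySem.Set.contains]
  | cons p r =>
    obtain ⟨v, t⟩ := p
    rw [syntaxLoopA]
    by_cases h1 : t = "more"
    · subst h1
      simp [L_more_sign, pvTails, PySem.Set.ofList, PySem.Set.contains, Bool.and_or_distrib_left, Bool.or_assoc, Bool.beq_eq_decide_eq]
    by_cases h2 : t = "less"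
    · subst h2
      simp [L_less_sign, pvTails, PySem.Set.ofList, PySem.Set.contains, Bool.and_or_distrib_left, Bool.or_assoc, Bool.beq_eq_decide_eq]
    by_cases h3 : t = "equal"
    · subst h3
      simp [L_equal_sign, pvTails, PySem.Set.ofList, PySem.Set.contains, Bool.and_or_distrib_left, Bool.or_assoc, Bool.beq_eq_decide_eq, h1, h2]
    · simp [h1, h2, h3, finA, pvTails, PySem.Set.ofList, PySem.Set.contains]

theorem hexA_eq (l : List Char) :
    syntaxHexA l = l.all (fun c => pvHexChars.toList.contains c) := by
  induction l with
  | nil => rfl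
  | cons c rest ih =>
    have e : "0123456789ABCDFabcdf".toList.contains c = pvHexChars.toList.contains c := rfl
    rw [syntaxHexA, e, List.all_cons, ← ih]
    cases hc : pvHexChars.toList.contains c <;> simp [hc]

set_option maxHeartbeats 1000000 in
theorem main_eq (data : List (String × String)) (a : Bool) :
    finA (syntaxLoopA data "start" a) = (a && pvAccepts data) := by
  obtain _ | ⟨⟨v1, t1⟩, data⟩ := data
  · simp [finA, syntaxLoopA, pvAccepts]
  by_cases h1 : t1 = "keyword_repeat"
  case neg => rw [syntaxLoopA]; simp [h1, finA, pvAccepts]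
  subst h1; rw [syntaxLoopA]
  simp only [String.reduceEq, and_self, and_true, and_false, true_and, false_and, or_self, or_false, false_or, reduceIte]
  obtain _ | ⟨⟨v2, t2⟩, data⟩ := data
  · simp [finA, syntaxLoopA, pvAccepts]
  by_cases h2 : t2 = "identifier"
  case neg => rw [syntaxLoopA]; simp [h2, finA, pvAccepts]
  subst h2; rw [syntaxLoopA]
  simp only [String.reduceEq, and_self, and_true, and_false, true_and, false_and, or_self, or_false, false_or, reduceIte]
  obtain _ | ⟨⟨v3, t3⟩, data⟩ := data
  · simp [finA, syntaxLoopA, pvAccepts]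
  by_cases h3 : t3 = "bracket1"
  case neg => rw [syntaxLoopA]; simp [h3, finA, pvAccepts]
  subst h3; rw [syntaxLoopA]
  simp only [String.reduceEq, and_self, and_true, and_false, true_and, false_and, or_self, or_false, false_or, reduceIte]
  obtain _ | ⟨⟨v4, t4⟩, data⟩ := data
  · simp [finA, syntaxLoopA, pvAccepts]
  by_cases h4 : t4 = "dollar_sign"
  case neg => rw [syntaxLoopA]; simp [h4, finA, pvAccepts]
  subst h4; rw [syntaxLoopA]
  simp only [String.reduceEq, and_self, and_true, and_false, true_and, false_and, or_self, or_false, false_or, reduceIte]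
  obtain _ | ⟨⟨hv, t5⟩, data⟩ := data
  · simp [finA, syntaxLoopA, pvAccepts]
  by_cases h5 : t5 = "hex"
  case neg => rw [syntaxLoopA]; simp [h5, finA, pvAccepts]
  subst h5; rw [syntaxLoopA]
  simp only [String.reduceEq, and_self, and_true, and_false, true_and, false_and, or_self, or_false, false_or, reduceIte]
  obtain _ | ⟨⟨v6, t6⟩, data⟩ := data
  · simp [finA, syntaxLoopA, pvAccepts]
  by_cases h6 : (t6 = "plus-minus" ∨ t6 = "multiplication" ∨ t6 = "keyword_div" ∨ t6 = "keyword_mod")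
  case neg =>
    have hB : pvAccepts ((v1,"keyword_repeat")::(v2,"identifier")::(v3,"bracket1")::(v4,"dollar_sign")::(hv,"hex")::(v6,t6)::data) = false := by
      unfold pvAccepts
      split
      · rename_i heq
        push_neg at h6
        simp_all [pvOps, PySem.Set.ofList, PySem.Set.contains]
      · rfl
    rw [syntaxLoopA]; simp [h6, finA, hB]
  rw [syntaxLoopA]
  simp only [String.reduceEq, and_self, and_true, and_false, true_and, false_and, or_self, or_false, false_or, reduceIte]
  rw [if_pos h6]
  have hops : PySem.Set.contains pvOps t6 = true := by
    rcases h6 with rfl | rfl | rfl | rfl <;> simp [pvOps, PySem.Set.ofList, PySem.Set.contains]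
  obtain _ | ⟨⟨v7, t7⟩, data⟩ := data
  · simp [finA, syntaxLoopA, pvAccepts]
  by_cases h7 : t7 = "identifier"
  case neg =>
    have hB : pvAccepts ((v1,"keyword_repeat")::(v2,"identifier")::(v3,"bracket1")::(v4,"dollar_sign")::(hv,"hex")::(v6,t6)::(v7,t7)::data) = false := by
      unfold pvAccepts
      split
      · rename_i heq; simp_all
      · rfl
    rw [syntaxLoopA]; simp [h7, finA, hB]
  subst h7; rw [syntaxLoopA]
  simp only [String.reduceEq, and_self, and_true, and_false, true_and, false_and, or_self, or_false, false_or, reduceIte]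
  obtain _ | ⟨⟨v8, t8⟩, data⟩ := data
  · simp [finA, syntaxLoopA, pvAccepts]
  by_cases h8 : t8 = "bracket2"
  case neg =>
    have hB : pvAccepts ((v1,"keyword_repeat")::(v2,"identifier")::(v3,"bracket1")::(v4,"dollar_sign")::(hv,"hex")::(v6,t6)::(v7,"identifier")::(v8,t8)::data) = false := by
      unfold pvAccepts
      split
      · rename_i heq; simp_all
      · rfl
    rw [syntaxLoopA]; simp [h8, finA, hB]
  subst h8; rw [syntaxLoopA]
  simp only [String.reduceEq, and_self, and_true, and_false, true_and, false_and, or_self, or_false, false_or, reduceIte]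
  obtain _ | ⟨⟨v9, t9⟩, data⟩ := data
  · simp [finA, syntaxLoopA, pvAccepts]
  by_cases h9 : t9 = "keyword_until"
  case neg =>
    have hB : pvAccepts ((v1,"keyword_repeat")::(v2,"identifier")::(v3,"bracket1")::(v4,"dollar_sign")::(hv,"hex")::(v6,t6)::(v7,"identifier")::(v8,"bracket2")::(v9,t9)::data) = false := by
      unfold pvAccepts
      split
      · rename_i heq; simp_all
      · rfl
    rw [syntaxLoopA]; simp [h9, finA, hB]
  subst h9; rw [syntaxLoopA]
  simp only [String.reduceEq, and_self, and_true, and_false, true_and, false_and, or_self, or_false, false_or, reduceIte]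
  obtain _ | ⟨⟨v10, t10⟩, data⟩ := data
  · simp [finA, syntaxLoopA, pvAccepts]
  by_cases h10 : t10 = "identifier"
  case neg =>
    have hB : pvAccepts ((v1,"keyword_repeat")::(v2,"identifier")::(v3,"bracket1")::(v4,"dollar_sign")::(hv,"hex")::(v6,t6)::(v7,"identifier")::(v8,"bracket2")::(v9,"keyword_until")::(v10,t10)::data) = false := by
      unfold pvAccepts
      split
      · rename_i heq; simp_all
      · rfl
    rw [syntaxLoopA]; simp [h10, finA, hB]
  subst h10; rw [syntaxLoopA]
  simp only [String.reduceEq, and_self, and_true, and_false, true_and, false_and, or_self, or_false, false_or, reduceIte]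
  rw [L_name3]
  simp only [pvAccepts, hexA_eq, hops, Bool.true_and]
  cases a <;> cases hv.toList.all (fun c => pvHexChars.toList.contains c) <;>
    cases PySem.Set.contains pvTails (data.map Prod.snd) <;> simp

-- ===== VERDICT (by name: the statement is the Claim_ definition above) =====
theorem syntax_py_spec : Claim_equal_syntax_py := by
  intro data _
  unfold Spec_syntax_py syntax_py syntax_py_alt
  have h := main_eq data true
  rw [Bool.true_and] at h
  cases hA : pvAccepts data
  · rw [hA] at h
    have hne : ¬ ((syntaxLoopA data "start" true).1 = true ∧ (syntaxLoopA data "start" true).2 = "semicolon") := by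
      rintro ⟨hc1, hc2⟩
      rw [finA, hc1, hc2] at h
      simp at h
    rw [if_neg hne]; simp
  · rw [hA] at h
    have h1 : (syntaxLoopA data "start" true).1 = true ∧ (syntaxLoopA data "start" true).2 = "semicolon" := by
      rw [finA, Bool.and_eq_true, beq_iff_eq] at h; exact h
    rw [if_pos h1]; simp
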